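-- pv_equiv track=rewrite | github.com/FAST-HEP/fast-curator | fast_curator/write.py | select_default
-- ===== SOURCE A (Python) =====
-- import itertools
-- import operator
--
-- def select_default(values):
--     groups = itertools.groupby(sorted(values))
--     groups = [(group, sum(1 for _ in items)) for group, items in groups]
--     groups = [group for group in groups if group[1] > 1]
--     if not groups:
--         return None
--     most_common, number_items = max(groups, key=operator.itemgetter(1))
--     is_unique = sum([1 for group in groups if group[1] == number_items]) == 1
--     if not is_unique:
--         return None
--     return most_common
-- ===== SOURCE B (Python) =====
-- def _close(best, cur):
--     bv, bc, u = best
--     cv, cc = cur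
--     if cc > bc:
--         return (cv, cc, True)
--     if cc == bc:
--         return (bv, bc, False)
--     return best
--
--
-- def select_default(values):
--     # one streaming pass over the sorted values: track the current run and the
--     # best (longest) run seen so far, plus whether that best length is unique
--     best = (None, 0, True)
--     cur = (None, 0)
--     for v in sorted(values):
--         if cur[1] and cur[0] == v:
--             cur = (v, cur[1] + 1)
--         else:
--             if cur[1]:
--                 best = _close(best, cur)
--             cur = (v, 1)
--     best = _close(best, cur)
--     bv, bc, u = best
--     return bv if bc > 1 and u else None
-- ===== Notes on version B (the rewrite author's own statement) =====
-- stated objective: alternative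
-- what changed: Replaces the build-groups-list / filter / max / uniqueness-count multi-pass pipeline with a single streaming pass over the sorted values that maintains the current run and the best run length together with a uniqueness flag.
import Mathlib
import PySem

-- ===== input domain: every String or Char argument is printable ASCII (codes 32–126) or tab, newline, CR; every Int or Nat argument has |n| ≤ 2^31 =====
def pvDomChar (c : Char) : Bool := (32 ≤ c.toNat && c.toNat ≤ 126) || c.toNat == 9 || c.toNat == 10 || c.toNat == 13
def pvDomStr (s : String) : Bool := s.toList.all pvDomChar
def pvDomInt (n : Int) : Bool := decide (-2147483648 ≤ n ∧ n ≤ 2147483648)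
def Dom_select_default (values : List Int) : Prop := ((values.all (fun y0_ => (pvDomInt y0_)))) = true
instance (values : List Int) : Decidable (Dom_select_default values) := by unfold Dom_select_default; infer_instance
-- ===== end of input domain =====

-- B replaces A's build-groups-list / filter / max / uniqueness-count pipeline with one
-- streaming pass over the sorted values (same sort, same result; alternative decomposition).


-- ===== PORT A =====
-- itertools.groupby(sorted(values)) together with the count comprehension:
-- consecutive runs of equal values, each with its length.
def runsA : List Int → List (Int × Int)
  | [] => []
  | x :: xs =>
    (x, 1 + ((xs.takeWhile (· == x)).length : Int)) :: runsA (xs.dropWhile (· == x))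
termination_by l => l.length
decreasing_by
  simp only [List.length_cons]
  exact Nat.lt_succ_of_le (List.length_dropWhile_le _ _)

def select_default (values : List Int) : Option Int :=
  let groups0 := runsA (PySem.List.sorted values (fun x => x))
  let groups := groups0.filter (fun g => decide (g.2 > 1))
  if groups.isEmpty then none
  else
    match PySem.List.max? groups (fun g => g.2) with
    | none => none   -- unreachable: groups ≠ []
    | some m =>
      if groups.countP (fun g => g.2 == m.2) == 1 then some m.1 else none

-- ===== PORT B =====
-- _close(best, cur) from Source B
def closeB (best : Option Int × Int × Bool) (cur : Option Int × Int) : Option Int × Int × Bool :=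
  if cur.2 > best.2.1 then (cur.1, cur.2, true)
  else if cur.2 == best.2.1 then (best.1, best.2.1, false)
  else best

-- the loop body of Source B
def stepB (st : (Option Int × Int × Bool) × (Option Int × Int)) (v : Int) :
    (Option Int × Int × Bool) × (Option Int × Int) :=
  if st.2.2 ≠ 0 ∧ st.2.1 == some v then (st.1, (some v, st.2.2 + 1))
  else ((if st.2.2 ≠ 0 then closeB st.1 st.2 else st.1), (some v, 1))

def select_default_alt (values : List Int) : Option Int :=
  let st := (PySem.List.sorted values (fun x => x)).foldl stepB ((none, 0, true), (none, 0))
  let best := closeB st.1 st.2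
  if best.2.1 > 1 ∧ best.2.2 = true then best.1 else none

-- ===== PRECONDITION & SPEC =====
def Spec_select_default (values : List Int) (out : Option Int) : Prop := out = select_default_alt values
instance (values : List Int) (out : Option Int) : Decidable (Spec_select_default values out) := by unfold Spec_select_default; infer_instance

-- ===== CLAIM (what is proved, stated in full; the proofs are below) =====
def Claim_equal_select_default : Prop := ∀ (values : List Int), Dom_select_default values → Spec_select_default values (select_default values)

-- ===== LEMMAS AND PROOFS =====

-- run-level fold: what Source B's loop does to `best`, one run at a time
def runFold : (Option Int × Int × Bool) → List (Int × Int) → (Option Int × Int × Bool)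
  | b, [] => b
  | b, (v, c) :: rs => runFold (closeB b (some v, c)) rs

-- running maximum of the run lengths, seeded with b
def cmax (b : Int) (rs : List (Int × Int)) : Int := rs.foldl (fun m r => max m r.2) b

lemma le_cmax (b : Int) (rs : List (Int × Int)) : b ≤ cmax b rs := by
  induction rs generalizing b with
  | nil => simp [cmax]
  | cons r t ih => exact le_trans (le_max_left b r.2) (ih (max b r.2))

lemma mem_le_cmax {r : Int × Int} {rs : List (Int × Int)} (h : r ∈ rs) (b : Int) :
    r.2 ≤ cmax b rs := by
  induction rs generalizing b with
  | nil => cases h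
  | cons y t ih =>
    rcases List.mem_cons.mp h with h | h
    · subst h; exact le_trans (le_max_right b r.2) (le_cmax _ t)
    · exact ih h (max b y.2)

lemma cmax_le {b K : Int} {rs : List (Int × Int)} (hb : b ≤ K)
    (h : ∀ r ∈ rs, r.2 ≤ K) : cmax b rs ≤ K := by
  induction rs generalizing b with
  | nil => exact hb
  | cons y t ih =>
    exact ih (max_le hb (h y (List.mem_cons_self))) (fun r hr => h r (List.mem_cons_of_mem _ hr))

lemma cmax_exists {b : Int} {rs : List (Int × Int)} (h : b < cmax b rs) :
    ∃ r ∈ rs, r.2 = cmax b rs := by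
  induction rs generalizing b with
  | nil => simp [cmax] at h
  | cons y t ih =>
    have hcons : cmax b (y :: t) = cmax (max b y.2) t := rfl
    by_cases hy : max b y.2 < cmax (max b y.2) t
    · obtain ⟨r, hr, hre⟩ := ih hy
      exact ⟨r, List.mem_cons_of_mem _ hr, by rw [hcons]; exact hre⟩
    · have he : cmax (max b y.2) t = max b y.2 := le_antisymm (not_lt.mp hy) (le_cmax _ _)
      rw [hcons] at h ⊢
      rw [he] at h ⊢
      refine ⟨y, List.mem_cons_self, ?_⟩
      rcases max_choice b y.2 with hc | hc <;> omega

-- semantics of runFold (Source B's best-tracking) in closed form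
lemma runFold_spec (rs : List (Int × Int)) : ∀ bv bc u,
    runFold (bv, bc, u) rs =
      if bc < cmax bc rs then
        ((rs.find? (fun r => r.2 == cmax bc rs)).map Prod.fst, cmax bc rs,
          rs.countP (fun r => r.2 == cmax bc rs) == 1)
      else (bv, bc, u && (rs.countP (fun r => r.2 == bc) == 0)) := by
  induction rs with
  | nil => intro bv bc u; simp [runFold, cmax]
  | cons r t ih =>
    intro bv bc u
    obtain ⟨v, c⟩ := r
    have hcons : cmax bc ((v, c) :: t) = cmax (max bc c) t := rfl
    show runFold (closeB (bv, bc, u) (some v, c)) t = _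
    rcases lt_trichotomy bc c with h1 | h1 | h1
    · -- strict improvement: best becomes (v, c, true)
      have hclose : closeB (bv, bc, u) (some v, c) = (some v, c, true) := by
        simp [closeB, h1]
      have hmax : max bc c = c := max_eq_right h1.le
      have hM : bc < cmax bc ((v, c) :: t) := by
        rw [hcons, hmax]; exact lt_of_lt_of_le h1 (le_cmax c t)
      rw [hclose, ih, if_pos hM, hcons, hmax]
      by_cases h2 : c < cmax c t
      · have hne : (c == cmax c t) = false := beq_eq_false_iff_ne.mpr (ne_of_lt h2)
        rw [if_pos h2]
        simp [List.find?, hne]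
      · have heq : cmax c t = c := le_antisymm (not_lt.mp h2) (le_cmax c t)
        have hbeq : (c == cmax c t) = true := beq_iff_eq.mpr heq.symm
        rw [if_neg h2, heq]
        have hcount : ∀ n : Nat, (true && (n == 0)) = (n + 1 == 1) := by
          intro n; cases n <;> rfl
        simp only [List.find?, List.countP_cons, beq_self_eq_true, if_true, Option.map_some]
        exact congrArg (fun z => (some v, c, z)) (hcount _)
    · -- tie with the best: uniqueness flag cleared
      subst h1
      have hclose : closeB (bv, bc, u) (some v, bc) = (bv, bc, false) := by
        simp [closeB]
      have hmax : max bc bc = bc := max_self bc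
      rw [hclose, ih, hcons, hmax]
      by_cases h2 : bc < cmax bc t
      · have hne : (bc == cmax bc t) = false := beq_eq_false_iff_ne.mpr (ne_of_lt h2)
        rw [if_pos h2, if_pos h2]
        simp [List.find?, hne]
      · have hbeq : (bc == bc) = true := beq_self_eq_true bc
        rw [if_neg h2, if_neg h2]
        simp
    · -- shorter run: state unchanged
      have hclose : closeB (bv, bc, u) (some v, c) = (bv, bc, u) := by
        simp only [closeB]
        rw [if_neg (by simp; omega), if_neg (by simp; omega)]
      have hmax : max bc c = bc := max_eq_left h1.le
      rw [hclose, ih, hcons, hmax]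
      by_cases h2 : bc < cmax bc t
      · have hne : (c == cmax bc t) = false :=
          beq_eq_false_iff_ne.mpr (ne_of_lt (lt_trans h1 h2))
        rw [if_pos h2, if_pos h2]
        simp [List.find?, hne]
      · have hne : (c == bc) = false := beq_eq_false_iff_ne.mpr (ne_of_lt h1)
        rw [if_neg h2, if_neg h2]
        simp [hne]

-- Source B's loop, run over any remaining list from a live current run, equals runFold over the runs
lemma foldl_stepB_runs (l : List Int) : ∀ (best : Option Int × Int × Bool) (x : Int) (c : Int), 0 < c →
    closeB (l.foldl stepB (best, (some x, c))).1 (l.foldl stepB (best, (some x, c))).2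
    = runFold best ((x, c + ((l.takeWhile (· == x)).length : Int)) :: runsA (l.dropWhile (· == x))) := by
  induction l with
  | nil =>
    intro best x c hc
    simp [runFold, show runsA [] = [] from by rw [runsA]]
  | cons y ys ih =>
    intro best x c hc
    by_cases hxy : y = x
    · subst hxy
      have hstep : stepB (best, (some y, c)) y = (best, (some y, c + 1)) := by
        simp only [stepB]
        rw [if_pos ⟨by omega, by simp⟩]
      simp only [List.foldl_cons, hstep, List.takeWhile_cons, List.dropWhile_cons,
        beq_self_eq_true, if_true, List.length_cons]
      rw [ih best y (c + 1) (by omega)]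
      have : c + ((((ys.takeWhile (· == y)).length + 1 : Nat)) : Int)
           = c + 1 + ((ys.takeWhile (· == y)).length : Int) := by push_cast; ring
      rw [this]
    · have hbne : (y == x) = false := beq_eq_false_iff_ne.mpr hxy
      have hstep : stepB (best, (some x, c)) y = (closeB best (some x, c), (some y, 1)) := by
        have hng : ¬(c ≠ 0 ∧ ((some x == some y) = true)) := by
          rintro ⟨-, h⟩
          have hx : x = y := by simpa using h
          exact hxy hx.symm
        simp only [stepB]
        rw [if_neg hng, if_pos (by omega)]
      simp only [List.foldl_cons, hstep, List.takeWhile_cons, List.dropWhile_cons, hbne,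
        Bool.false_eq_true, if_false, List.length_nil]
      rw [ih (closeB best (some x, c)) y 1 (by omega)]
      rw [show runsA (y :: ys)
            = (y, 1 + ((ys.takeWhile (· == y)).length : Int)) :: runsA (ys.dropWhile (· == y))
          from by rw [runsA]]
      norm_num [runFold]

-- every run produced by runsA is non-empty
lemma runsA_pos (l : List Int) : ∀ r ∈ runsA l, 0 < r.2 := by
  induction l using runsA.induct with
  | case1 => simp [runsA]
  | case2 x xs ih =>
    intro r hr
    rw [runsA] at hr
    rcases List.mem_cons.mp hr with h | h
    · subst h; have := Int.natCast_nonneg (xs.takeWhile (· == x)).length; simp; omega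
    · exact ih r h

-- Python's max(f, key=itemgetter(1)) is the first element whose count is the maximal count
lemma max?_eq_find? (t : List (Int × Int)) : ∀ m : Int × Int,
    PySem.List.max? (m :: t) (fun g => g.2) = (m :: t).find? (fun r => r.2 == cmax m.2 t) := by
  induction t with
  | nil => intro m; simp [PySem.List.max?, List.find?, cmax]
  | cons y t' ih =>
    intro m
    have hstep : PySem.List.max? (m :: y :: t') (fun g => g.2)
        = PySem.List.max? ((if m.2 < y.2 then y else m) :: t') (fun g => g.2) := by
      by_cases h : m.2 < y.2 <;> simp [PySem.List.max?, List.foldl_cons, h]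
    rw [hstep]
    by_cases h : m.2 < y.2
    · rw [if_pos h, ih y]
      have hK : cmax m.2 (y :: t') = cmax y.2 t' := by
        show cmax (max m.2 y.2) t' = _
        rw [max_eq_right h.le]
      have hmne : (m.2 == cmax y.2 t') = false :=
        beq_eq_false_iff_ne.mpr (ne_of_lt (lt_of_lt_of_le h (le_cmax _ _)))
      rw [hK]
      simp [List.find?, hmne]
    · rw [if_neg h, ih m]
      have hK : cmax m.2 (y :: t') = cmax m.2 t' := by
        show cmax (max m.2 y.2) t' = _
        rw [max_eq_left (not_lt.mp h)]
      rw [hK]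
      by_cases hm : (m.2 == cmax m.2 t') = true
      · simp [List.find?, hm]
      · have hyne : (y.2 == cmax m.2 t') = false := by
          refine beq_eq_false_iff_ne.mpr (fun hy => ?_)
          have h1 : y.2 ≤ m.2 := not_lt.mp h
          have h2 : m.2 ≤ cmax m.2 t' := le_cmax _ _
          exact hm (beq_iff_eq.mpr (by omega))
        have hmf : (m.2 == cmax m.2 t') = false := by
          rwa [Bool.not_eq_true] at hm
        simp [List.find?, hmf, hyne]

-- A's pipeline after grouping (proof-only abbreviation of select_default's body)
def pipeA (rs : List (Int × Int)) : Option Int :=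
  let groups := rs.filter (fun g => decide (g.2 > 1))
  if groups.isEmpty then none
  else
    match PySem.List.max? groups (fun g => g.2) with
    | none => none
    | some m => if groups.countP (fun g => g.2 == m.2) == 1 then some m.1 else none

-- Source B's final return (proof-only abbreviation of select_default_alt's last line)
def finB (b : Option Int × Int × Bool) : Option Int :=
  if b.2.1 > 1 ∧ b.2.2 = true then b.1 else none

-- A's multi-pass pipeline equals Source B's single-pass result, on the shared run list
lemma pipeline_eq (rs : List (Int × Int)) (hpos : ∀ r ∈ rs, 0 < r.2) :
    pipeA rs = finB (runFold (none, 0, true) rs) := by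
  by_cases hnil : rs = []
  · subst hnil; simp [pipeA, finB, runFold]
  · obtain ⟨w0, hw0⟩ := List.exists_mem_of_ne_nil rs hnil
    have hM : (0 : Int) < cmax 0 rs := lt_of_lt_of_le (hpos w0 hw0) (mem_le_cmax hw0 0)
    unfold pipeA finB
    rw [runFold_spec rs none 0 true, if_pos hM]
    dsimp only
    by_cases hM1 : 1 < cmax 0 rs
    · obtain ⟨w, hw, hwM⟩ := cmax_exists hM
      have hwf : w ∈ rs.filter (fun g => decide (g.2 > 1)) :=
        List.mem_filter.mpr ⟨hw, by simp; omega⟩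
      obtain ⟨m0, t0, hft⟩ : ∃ m0 t0, rs.filter (fun g => decide (g.2 > 1)) = m0 :: t0 := by
        rcases hcs : rs.filter (fun g => decide (g.2 > 1)) with _ | ⟨a, b⟩
        · rw [hcs] at hwf; cases hwf
        · exact ⟨a, b, hcs⟩
      have hie : (rs.filter (fun g => decide (g.2 > 1))).isEmpty = false := by
        rw [hft]; rfl
      rw [hie, hft, max?_eq_find? t0 m0]
      have hm0pos : 0 < m0.2 := hpos m0 (List.mem_of_mem_filter (hft ▸ List.mem_cons_self))
      have h0f : cmax 0 (rs.filter (fun g => decide (g.2 > 1))) = cmax 0 rs := by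
        refine le_antisymm (cmax_le (le_cmax 0 rs) ?_) ?_
        · exact fun r hr => mem_le_cmax (List.mem_of_mem_filter hr) 0
        · exact hwM ▸ mem_le_cmax hwf 0
      have hc : cmax m0.2 t0 = cmax 0 rs := by
        have h1 : cmax 0 (m0 :: t0) = cmax m0.2 t0 := by
          show cmax (max 0 m0.2) t0 = _
          rw [max_eq_right hm0pos.le]
        rw [← h1, ← hft, h0f]
      rw [hc]
      have hpredF : (fun (a : Int × Int) =>
            decide ((decide (a.2 > 1)) = true ∧ (a.2 == cmax 0 rs) = true))
          = (fun (a : Int × Int) => a.2 == cmax 0 rs) := by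
        funext a
        by_cases ha : a.2 = cmax 0 rs
        · simp [ha]; omega
        · simp [beq_eq_false_iff_ne.mpr ha]
      have hfind : (m0 :: t0).find? (fun r => r.2 == cmax 0 rs)
          = rs.find? (fun r => r.2 == cmax 0 rs) := by
        rw [← hft, List.find?_filter, hpredF]
      have hpredC : (fun (a : Int × Int) => (a.2 == cmax 0 rs) && decide (a.2 > 1))
          = (fun (a : Int × Int) => a.2 == cmax 0 rs) := by
        funext a
        by_cases ha : a.2 = cmax 0 rs
        · simp [ha]; omega
        · simp [beq_eq_false_iff_ne.mpr ha]
      have hcount : (m0 :: t0).countP (fun r => r.2 == cmax 0 rs)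
          = rs.countP (fun r => r.2 == cmax 0 rs) := by
        rw [← hft, List.countP_filter, hpredC]
      obtain ⟨m', hfs⟩ : ∃ m', rs.find? (fun r => r.2 == cmax 0 rs) = some m' := by
        have : (rs.find? (fun r => r.2 == cmax 0 rs)).isSome :=
          List.find?_isSome.mpr ⟨w, hw, beq_iff_eq.mpr hwM⟩
        exact Option.isSome_iff_exists.mp this
      have hm'M : m'.2 = cmax 0 rs := by
        have h := List.find?_some hfs
        exact beq_iff_eq.mp h
      rw [hfind, hfs]
      simp only [Bool.false_eq_true, if_false]
      rw [hm'M, hcount]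
      by_cases hn : (rs.countP (fun r => r.2 == cmax 0 rs) == 1) = true
      · simp [hn, hM1]
      · rw [Bool.not_eq_true] at hn
        simp [hn]
    · have hfe : rs.filter (fun g => decide (g.2 > 1)) = [] := by
        refine List.filter_eq_nil_iff.mpr (fun a ha => ?_)
        have := mem_le_cmax ha 0
        simp; omega
      rw [hfe]
      simp [hM1]

-- ===== VERDICT (by name: the statement is the Claim_ definition above) =====
theorem select_default_spec : Claim_equal_select_default := by
  intro values _
  unfold Spec_select_default select_default select_default_alt
  generalize PySem.List.sorted values (fun x => x) = l
  rcases l with _ | ⟨v, vs⟩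
  · simp [show runsA [] = [] from by rw [runsA], closeB]
  · have hstep0 : stepB ((none, 0, true), (none, 0)) v = ((none, 0, true), (some v, 1)) := by
      simp [stepB]
    simp only [List.foldl_cons, hstep0]
    rw [foldl_stepB_runs vs (none, 0, true) v 1 one_pos]
    rw [← show runsA (v :: vs)
          = (v, 1 + ((vs.takeWhile (· == v)).length : Int)) :: runsA (vs.dropWhile (· == v))
        from by rw [runsA]]
    exact pipeline_eq (runsA (v :: vs)) (runsA_pos _)
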